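-- pv_equiv track=rewrite | github.com/paikwiki/python-programmers | quizzes/c30l135808.py | solution
-- ===== SOURCE A (Python) =====
-- def solution(k, m, score):
--     score.sort(reverse=True)
--     boxes = [
--         min(score[i : i + m]) * m
--         for i in range(0, len(score), m)
--         if len(score[i : i + m]) == m
--     ]
--
--     return sum(boxes)
-- ===== SOURCE B (Python) =====
-- def solution(k, m, score):
--     # B does not mutate `score` (A sorts it in place); return value is the same.
--     if m <= 0:
--         return 0
--     n = len(score)
--     return m * sum(v for i, v in enumerate(sorted(score)) if i % m == n % m)
-- ===== Notes on version B (the rewrite author's own statement) =====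
-- stated objective: simpler
-- what changed: Instead of sorting descending, chunking into slices of m and summing min(chunk)*m over full chunks, B sorts ascending and sums the elements whose index is congruent to len(score) mod m (exactly the minima of A's full chunks), multiplying the sum by m once; no slices, no min(), no chunking.
import Mathlib
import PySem

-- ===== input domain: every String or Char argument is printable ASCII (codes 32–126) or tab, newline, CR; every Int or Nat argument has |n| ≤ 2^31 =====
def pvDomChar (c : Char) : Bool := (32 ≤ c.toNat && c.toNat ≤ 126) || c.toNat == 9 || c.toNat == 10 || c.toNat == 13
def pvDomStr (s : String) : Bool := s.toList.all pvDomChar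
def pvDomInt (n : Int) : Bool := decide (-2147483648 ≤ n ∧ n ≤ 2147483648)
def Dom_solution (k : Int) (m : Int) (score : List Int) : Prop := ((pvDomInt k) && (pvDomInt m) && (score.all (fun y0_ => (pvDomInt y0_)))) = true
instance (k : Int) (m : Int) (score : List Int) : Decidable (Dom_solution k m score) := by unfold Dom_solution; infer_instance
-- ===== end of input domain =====

-- B replaces A's descending sort + per-chunk slice/min by an ascending sort and one
-- filtered pass summing the elements whose index ≡ len(score) (mod m) — exactly the minima
-- of A's full chunks — multiplying by m once (objective: simpler). A sorts its argument
-- list in place and B does not; the equivalence proved here is about the return value only.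

-- ===== PORT A =====
-- A: sort descending, then sum min(chunk)*m over the full chunks of size m.
-- min() is evaluated only under the guard len(chunk) == m (Python comprehension checks the
-- condition first), so the `.getD 0` default on min? below is never reached for m ≠ 0.
def solution (k : Int) (m : Int) (score : List Int) : Int :=
  let s := PySem.List.sorted score (fun x => x) true
  let boxes := (PySem.List.pyRange 0 (PySem.List.len s) m).foldl
    (fun acc i =>
      if PySem.List.len (PySem.List.slice s (some i) (some (i + m))) = m then
        acc ++ [(PySem.List.min? (PySem.List.slice s (some i) (some (i + m))) (fun x => x)).getD 0 * m]
      else acc) []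
  boxes.sum

-- ===== PORT B =====
-- B: for m <= 0 there are no groups, return 0; else sort ascending and sum the elements
-- whose index i satisfies i % m == len(score) % m, then multiply by m. The genexpr
-- sum(v for i, v in enumerate(...) if ...) is ported as a conditional fold over enumerate;
-- enumerate indices are in range, so pyGetD's default inside enumerate_eq_map_pyRange is unused.
def solution_alt (k : Int) (m : Int) (score : List Int) : Int :=
  if m ≤ 0 then 0
  else
    let n := PySem.List.len score
    let asc := PySem.List.sorted score (fun x => x) false
    m * ((PySem.List.enumerate asc).foldl
      (fun acc p => if PySem.Int.mod p.1 m = PySem.Int.mod n m then acc + p.2 else acc) 0)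

-- ===== PRECONDITION & SPEC =====
-- Pre_ excludes exactly m = 0, where Python's A raises ValueError (range step 0).
def Pre_solution (k : Int) (m : Int) (score : List Int) : Prop := m ≠ 0
instance (k : Int) (m : Int) (score : List Int) : Decidable (Pre_solution k m score) := by unfold Pre_solution; infer_instance
def pvWitness_solution : Int × Int × List Int := (1, 2, [4, 1, 3, 2])

def Spec_solution (k : Int) (m : Int) (score : List Int) (out : Int) : Prop := out = solution_alt k m score
instance (k : Int) (m : Int) (score : List Int) (out : Int) : Decidable (Spec_solution k m score out) := by unfold Spec_solution; infer_instance

-- ===== CLAIM (what is proved, stated in full; the proofs are below) =====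
def Claim_equal_solution : Prop := ∀ (k : Int) (m : Int) (score : List Int), Dom_solution k m score → Pre_solution k m score → Spec_solution k m score (solution k m score)

-- ===== LEMMAS AND PROOFS =====

-- range(a, b, step) is empty for a negative step when a ≤ b
theorem pv_pyRange_neg_nil (a b st : Int) (hst : st < 0) (hab : a ≤ b) :
    PySem.List.pyRange a b st = [] := by
  simp only [PySem.List.pyRange]
  split_ifs
  all_goals first | rfl | (exfalso; omega)

-- sorting with reverse=True is sorting by the negated key
theorem pv_sorted_desc (xs : List Int) :
    PySem.List.sorted xs (fun x => x) true = PySem.List.sorted xs (fun x => -x) false := by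
  simp only [PySem.List.sorted]
  rw [show (fun (a b : Int) => decide ((fun x => x) b < (fun x => x) a))
        = (fun a b : Int => decide ((fun x => -x) a < (fun x => -x) b)) from by
      funext a b; simp only [decide_eq_decide]; omega]
  simp

-- the descending sort is pairwise-descending
theorem pv_sorted_pairwise_ge (xs : List Int) :
    (PySem.List.sorted xs (fun x => x) true).Pairwise (fun a b => b ≤ a) := by
  rw [pv_sorted_desc]
  exact (PySem.List.sorted_pairwise xs (fun x => -x)).imp (fun hab => by omega)

-- the descending sort of an Int list is the reverse of its ascending sort
theorem pv_desc_eq_reverse_asc (xs : List Int) :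
    PySem.List.sorted xs (fun x => x) true = (PySem.List.sorted xs (fun x => x) false).reverse := by
  refine PySem.List.eq_of_perm_of_pairwise_le_of_injective (fun x : Int => -x) neg_injective
    ((PySem.List.sorted_perm xs _ true).trans
      ((PySem.List.sorted_perm xs (fun x => x) false).symm.trans
        (List.reverse_perm _).symm)) ?_ ?_
  · exact (pv_sorted_pairwise_ge xs).imp (fun hab => neg_le_neg hab)
  · rw [List.pairwise_reverse]
    exact (PySem.List.sorted_pairwise xs (fun x => x)).imp (fun hab => neg_le_neg hab)

theorem pv_range_filter_lt (a c : Nat) (h : c ≤ a) :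
    (List.range a).filter (fun k => decide (k < c)) = List.range c := by
  induction a with
  | zero =>
    have : c = 0 := Nat.le_zero.mp h
    subst this; rfl
  | succ a ih =>
    rcases Nat.lt_or_ge a c with hc | hc
    · have : c = a + 1 := by omega
      subst this
      rw [List.range_succ, List.filter_append,
          List.filter_eq_self.mpr (by intro x hx; simp [List.mem_range] at hx ⊢; omega)]
      simp
    · rw [List.range_succ, List.filter_append, ih hc]
      simp [Nat.not_lt.mpr hc]

-- the min of a nonempty pairwise-descending list is its last element
theorem pv_min_getD (l : List Int) (hne : l ≠ []) (hp : l.Pairwise (fun a b => b ≤ a)) :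
    (PySem.List.min? l (fun x => x)).getD 0 = l.getD (l.length - 1) 0 := by
  have hlen : 0 < l.length := by
    cases l with
    | nil => exact absurd rfl hne
    | cons a t => simp
  obtain ⟨v, hv⟩ : ∃ v, PySem.List.min? l (fun x => x) = some v := by
    cases h : PySem.List.min? l (fun x => x) with
    | none => exact absurd ((PySem.List.min?_eq_none_iff l _).mp h) hne
    | some v => exact ⟨v, rfl⟩
  have hmin := PySem.List.min?_isMin hv
  have hl1 : l.length - 1 < l.length := by omega
  have h1 : v ≤ l[l.length - 1] := hmin _ (List.getElem_mem hl1)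
  obtain ⟨i, hi, hvi⟩ := List.mem_iff_getElem.mp (PySem.List.min?_mem hv)
  have hpg := List.pairwise_iff_getElem.mp hp
  have h2 : l[l.length - 1] ≤ v := by
    rcases Nat.lt_or_ge i (l.length - 1) with hlt | hge
    · have := hpg i (l.length - 1) hi hl1 hlt
      rw [← hvi]; exact this
    · have : i = l.length - 1 := by omega
      subst this
      rw [← hvi]
  rw [hv, Option.getD_some, List.getD_eq_getElem l 0 hl1]
  omega

-- A's value for positive m: the sum over the full chunks of the chunk-end elements times m
theorem pv_A_char (k : Int) (M : Nat) (hM : 0 < M) (score : List Int) :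
    solution k (M : Int) score =
      ((List.range (score.length / M)).map
        (fun x => (PySem.List.sorted score (fun y => y) true).getD (M * x + M - 1) 0 * (M : Int))).sum := by
  dsimp only [solution]
  set s := PySem.List.sorted score (fun x => x) true with hs
  have hp : s.Pairwise (fun a b => b ≤ a) := pv_sorted_pairwise_ge score
  have hNs : s.length = score.length := (PySem.List.sorted_perm score (fun x => x) true).length_eq
  set N := s.length with hN2
  have hlen : PySem.List.len s = ((N : Nat) : Int) := rfl
  have hpos : (0 : Int) < (M : Int) := by exact_mod_cast hM
  rw [hlen, PySem.List.pyRange_of_pos 0 _ hpos, List.foldl_map]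
  simp only [zero_add, PySem.List.foldl_append_ite, List.nil_append]
  have hcA : (if (0 : Int) < (N : Int) then (((N : Int) - 0 + (M : Int) - 1) / (M : Int)).toNat else 0)
      = (N + M - 1) / M := by
    split_ifs with h
    · rw [show ((N : Int) - 0 + (M : Int) - 1) = ((N + M - 1 : Nat) : Int) from by omega,
          ← Int.natCast_div, Int.toNat_natCast]
    · have hN0 : N = 0 := by omega
      rw [hN0]; symm; apply Nat.div_eq_of_lt; omega
  rw [hcA]
  have hfc : ∀ x ∈ List.range ((N + M - 1) / M),
      (decide (PySem.List.len (PySem.List.slice s (some ((M : Int) * (x : Int))) (some ((M : Int) * (x : Int) + (M : Int)))) = (M : Int)))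
        = decide (x < N / M) := by
    intro x _
    rw [decide_eq_decide]
    rw [show ((M : Int) * (x : Int) + (M : Int)) = ((M * x + M : Nat) : Int) from by push_cast; ring,
        show ((M : Int) * (x : Int)) = ((M * x : Nat) : Int) from by push_cast; ring,
        PySem.List.slice_natCast, Nat.add_sub_cancel_left]
    have hlen2 : PySem.List.len ((s.drop (M * x)).take M) = ((min M (N - M * x) : Nat) : Int) := by
      simp [PySem.List.len, hN2]
    rw [hlen2, Nat.cast_inj]
    rw [show (x < N / M) = ((x + 1) * M ≤ N) from by
          rw [Nat.lt_iff_add_one_le, Nat.le_div_iff_mul_le hM],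
        show (x + 1) * M = M * x + M from by ring]
    generalize M * x = t
    constructor <;> (intro h; omega)
  rw [List.filter_congr hfc, pv_range_filter_lt _ _ (Nat.div_le_div_right (by omega)), ← hNs]
  refine congrArg List.sum (List.map_congr_left ?_)
  intro x hx
  have hxlt : x < N / M := List.mem_range.mp hx
  have hfull : M * x + M ≤ N := by
    have h1 := (Nat.le_div_iff_mul_le hM).mp (Nat.lt_iff_add_one_le.mp hxlt)
    rw [show (x + 1) * M = M * x + M from by ring] at h1
    exact h1
  rw [show ((M : Int) * (x : Int) + (M : Int)) = ((M * x + M : Nat) : Int) from by push_cast; ring,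
      show ((M : Int) * (x : Int)) = ((M * x : Nat) : Int) from by push_cast; ring,
      PySem.List.slice_natCast, Nat.add_sub_cancel_left]
  have hchlen : ((s.drop (M * x)).take M).length = M := by
    rw [List.length_take, List.length_drop, ← hN2]
    have h1 := hfull
    generalize M * x = t at h1 ⊢
    omega
  have hchne : (s.drop (M * x)).take M ≠ [] := by
    intro hnil; rw [hnil] at hchlen; simp at hchlen; omega
  have hchpair : ((s.drop (M * x)).take M).Pairwise (fun a b => b ≤ a) :=
    List.Pairwise.sublist ((List.take_sublist _ _).trans (List.drop_sublist _ _)) hp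
  rw [pv_min_getD _ hchne hchpair, hchlen]
  have hb1 : M - 1 < ((s.drop (M * x)).take M).length := by rw [hchlen]; omega
  have hb2 : M * x + M - 1 < s.length := by rw [← hN2]; omega
  rw [List.getD_eq_getElem _ _ hb1, List.getD_eq_getElem _ _ hb2]
  have hidx : M * x + M - 1 = M * x + (M - 1) := by omega
  congr 1
  simp only [List.getElem_take, List.getElem_drop]
  congr 1
  omega

-- the indices below q*M + r congruent to r (mod M), in order
theorem pv_filter_range_mod (M r : Nat) (hr : r < M) (q : Nat) :
    (List.range (q * M + r)).filter (fun j => j % M == r) = (List.range q).map (fun t => t * M + r) := by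
  induction q with
  | zero =>
    simp only [Nat.zero_mul, Nat.zero_add, List.range_zero, List.map_nil]
    refine List.filter_eq_nil_iff.mpr ?_
    intro j hj
    have hjr : j < r := List.mem_range.mp hj
    simp only [beq_iff_eq]
    rw [Nat.mod_eq_of_lt (by omega)]
    omega
  | succ q ih =>
    rw [show (q + 1) * M + r = (q * M + r) + M by ring, List.range_add, List.filter_append, ih,
        List.filter_map, List.range_succ, List.map_append]
    congr 1
    have hcg : ∀ j ∈ List.range M,
        ((fun j => j % M == r) ∘ (fun x => q * M + r + x)) j = (j == 0) := by
      intro j hj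
      have hjM : j < M := List.mem_range.mp hj
      simp only [Function.comp_apply]
      rw [show q * M + r + j = M * q + (r + j) by ring, Nat.mul_add_mod]
      rcases Nat.lt_or_ge (r + j) M with h | h
      · rw [Nat.mod_eq_of_lt h, Bool.eq_iff_iff]; simp only [beq_iff_eq]; omega
      · rw [Nat.mod_eq_sub_mod h, Nat.mod_eq_of_lt (by omega), Bool.eq_iff_iff]
        simp only [beq_iff_eq]; omega
    rw [List.filter_congr hcg]
    obtain ⟨K, rfl⟩ := Nat.exists_eq_succ_of_ne_zero (by omega : M ≠ 0)
    rw [List.range_succ_eq_map, List.filter_cons]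
    simp

theorem pv_main (k m : Int) (score : List Int) (hm : m ≠ 0) :
    solution k m score = solution_alt k m score := by
  rcases lt_or_gt_of_ne hm with hneg | hpos
  · -- m < 0: A's range is empty, B's guard returns 0
    have hA : solution k m score = 0 := by
      dsimp only [solution]
      rw [show PySem.List.len (PySem.List.sorted score (fun x => x) true)
            = (((PySem.List.sorted score (fun x => x) true).length : Nat) : Int) from rfl,
          pv_pyRange_neg_nil _ _ _ hneg (by positivity)]
      rfl
    rw [hA, solution_alt, if_pos (le_of_lt hneg)]
  · obtain ⟨M, rfl⟩ : ∃ M : Nat, m = (M : Int) := ⟨m.toNat, (Int.toNat_of_nonneg hpos.le).symm⟩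
    have hM : 0 < M := by exact_mod_cast hpos
    rw [pv_A_char k M hM score]
    dsimp only [solution_alt]
    rw [if_neg (not_le.mpr hpos)]
    set asc := PySem.List.sorted score (fun x => x) false with hasc
    set n := score.length with hn
    set q := n / M with hq
    set r := n % M with hr
    have hnqr : n = q * M + r := by rw [hq, hr, Nat.mul_comm]; exact (Nat.div_add_mod n M).symm
    have hrM : r < M := Nat.mod_lt _ hM
    have hlasc : asc.length = n := (PySem.List.sorted_perm score (fun x => x) false).length_eq
    -- B side: enumerate as an index range, the fold as a filtered sum
    have hlens : PySem.List.len score = ((n : Nat) : Int) := rfl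
    have hlena : PySem.List.len asc = ((n : Nat) : Int) := by
      rw [show PySem.List.len asc = ((asc.length : Nat) : Int) from rfl, hlasc]
    rw [hlens, PySem.List.enumerate_eq_map_pyRange asc 0, hlena,
        PySem.List.pyRange_zero_natCast n, List.map_map]
    simp only [List.foldl_map, Function.comp_apply]
    rw [PySem.List.foldl_ite_eq_foldl_filter
          (p := fun j : Nat => PySem.Int.mod ((j : Nat) : Int) (M : Int) = PySem.Int.mod ((n : Nat) : Int) (M : Int))
          (f := fun (acc : Int) (j : Nat) => acc + PySem.List.pyGetD asc ((j : Nat) : Int) 0),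
        PySem.List.foldl_add]
    have hfc : ∀ j ∈ List.range n,
        (decide (PySem.Int.mod ((j : Nat) : Int) (M : Int) = PySem.Int.mod ((n : Nat) : Int) (M : Int)))
          = (j % M == r) := by
      intro j _
      rw [Bool.eq_iff_iff]
      simp only [PySem.Int.mod_natCast, Nat.cast_inj, beq_iff_eq, decide_eq_true_eq, hr]
    rw [List.filter_congr hfc, show List.range n = List.range (q * M + r) from by rw [← hnqr],
        pv_filter_range_mod M r hrM q, List.map_map,
        show (fun j : Nat => PySem.List.pyGetD asc ((j : Nat) : Int) 0) ∘ (fun t : Nat => t * M + r)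
            = (fun t : Nat => asc.getD (t * M + r) 0) from by
          funext t; simp [PySem.List.pyGetD_natCast]]
    -- A side: the descending sort is the reverse of the ascending sort
    rw [pv_desc_eq_reverse_asc, ← hasc]
    have hrev : ∀ x ∈ List.range q,
        asc.reverse.getD (M * x + M - 1) 0 * (M : Int)
          = asc.getD ((q - 1 - x) * M + r) 0 * (M : Int) := by
      intro x hx
      have hxq : x < q := List.mem_range.mp hx
      have hMq : M * q + r = n := by rw [hnqr]; ring
      have hx1 : M * (x + 1) = M * x + M := by ring
      have h1 : M * (x + 1) ≤ M * q := Nat.mul_le_mul_left M (by omega)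
      have h2 : q - 1 - x + (x + 1) = q := by omega
      have h3 : (q - 1 - x) * M + (x + 1) * M = q * M := by rw [← Nat.add_mul, h2]
      have h4 : M ≤ (x + 1) * M := Nat.le_mul_of_pos_left M (by omega)
      have h5 : q * M = M * q := by ring
      have h6 : (x + 1) * M = M * (x + 1) := by ring
      have hb : M * x + M - 1 < asc.reverse.length := by
        rw [List.length_reverse, hlasc]; omega
      have hb2 : (q - 1 - x) * M + r < asc.length := by rw [hlasc]; omega
      rw [List.getD_eq_getElem _ _ hb, List.getD_eq_getElem _ _ hb2, List.getElem_reverse]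
      have hidx : asc.length - 1 - (M * x + M - 1) = (q - 1 - x) * M + r := by rw [hlasc]; omega
      simp only [hidx]
    rw [List.map_congr_left hrev, List.sum_map_mul_right, zero_add, mul_comm]
    congr 1
    have hsum : ∀ f : Nat → Int, ((List.range q).map f).sum = ∑ i ∈ Finset.range q, f i :=
      fun f => rfl
    rw [hsum, hsum]
    exact Finset.sum_range_reflect (fun t => asc.getD (t * M + r) 0) q

-- ===== VERDICT (by name: the statement is the Claim_ definition above) =====
theorem solution_spec : Claim_equal_solution := by
  intro k m score _ hpre
  exact pv_main k m score hpre
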